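-- pv_equiv track=rewrite | github.com/Nikkuniku/AtcoderProgramming | ARC/ARC191/b.py | solve
-- ===== SOURCE A (Python) =====
-- def solve(N, K):
--     digit_2 = []
--     zeros = 0
--     while N > 0:
--         d = N % 2
--         digit_2.append(d)
--         N //= 2
--         if d == 0:
--             zeros += 1
--     if (1 << zeros) < K:
--         return -1
--     b = list(bin(K - 1)[2:].zfill(zeros)[::-1])
--     j = -1
--     for i, v in enumerate(digit_2):
--         if v == 0:
--             j += 1
--             digit_2[i] = int(b[j])
--     res = 0
--     for i, v in enumerate(digit_2):
--         res += pow(2, i) * v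
--     return res
-- ===== SOURCE B (Python) =====
-- def solve(N, K):
--     # One arithmetic pass over N's bits: zero bits are filled with the low bits
--     # of K-1 (LSB first) while counting them; no digit list or bin() string.
--     if K < 1:
--         raise ValueError("K must be positive")
--     res = 0
--     fill = K - 1
--     zeros = 0
--     i = 0
--     m = N
--     while m > 0:
--         if m % 2 == 1:
--             res += 2 ** i
--         else:
--             zeros += 1
--             res += (fill % 2) * 2 ** i
--             fill //= 2
--         m //= 2
--         i += 1
--     if (1 << zeros) < K:
--         return -1
--     return res
-- ===== Notes on version B (the rewrite author's own statement) =====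
-- stated objective: simpler
-- what changed: Replaces A's three phases (build a digit list, splice in characters of the reversed zero-padded bin(K-1) string, reconstruct with pow) by one arithmetic loop over N's bits that accumulates the result directly, consuming K-1's low bits at zero positions; no list or string representation at all.
-- outside the precondition, e.g. on solve(4, -2): A returns 7, B raises ValueError
import Mathlib
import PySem

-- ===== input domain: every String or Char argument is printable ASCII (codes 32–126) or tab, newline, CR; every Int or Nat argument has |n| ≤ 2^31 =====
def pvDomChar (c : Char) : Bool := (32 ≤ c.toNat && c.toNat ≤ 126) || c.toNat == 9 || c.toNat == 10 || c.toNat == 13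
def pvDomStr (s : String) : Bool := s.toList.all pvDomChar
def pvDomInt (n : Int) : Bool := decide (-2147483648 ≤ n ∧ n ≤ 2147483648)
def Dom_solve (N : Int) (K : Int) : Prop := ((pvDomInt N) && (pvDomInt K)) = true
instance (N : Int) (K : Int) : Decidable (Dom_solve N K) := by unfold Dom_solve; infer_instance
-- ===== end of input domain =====

-- B replaces A's digit-list/bin-string splicing by a single arithmetic loop; objective: simpler.

theorem pv_fd2_lt (m : Int) (h : 0 < m) : (PySem.Int.floordiv m 2).toNat < m.toNat := by
  rw [PySem.Int.floordiv_eq_ediv_of_pos (by norm_num)]; omega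

-- ===== PORT A =====
-- the `while N > 0` loop: returns (digit_2, zeros)
def pvDigitsA (N : Int) : List Int × Nat :=
  if h : 0 < N then
    let d := PySem.Int.mod N 2
    let p := pvDigitsA (PySem.Int.floordiv N 2)
    (d :: p.1, (if d = 0 then 1 else 0) + p.2)
  else ([], 0)
termination_by N.toNat
decreasing_by exact pv_fd2_lt N h

-- bin(n) digit characters for n > 0 (MSB first)
def pvBinGo (n : Int) : List Char :=
  if h : 0 < n then
    pvBinGo (PySem.Int.floordiv n 2) ++ [if PySem.Int.mod n 2 = 1 then '1' else '0']
  else []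
termination_by n.toNat
decreasing_by exact pv_fd2_lt n h

-- bin(n)[2:] ; faithful for n ≥ 0 (Pre_solve makes K-1 ≥ 0)
def pvBinStr (n : Int) : List Char := if n = 0 then ['0'] else pvBinGo n

-- str.zfill(z): pad with '0' on the left to length z
def pvZfill (z : Nat) (s : List Char) : List Char := List.replicate (z - s.length) '0' ++ s

-- int(c) for a single char; none (ValueError) cannot occur under Pre_solve ('0'/'1' only)
def pvCharInt (c : Char) : Int := (PySem.Int.ofStr? (String.ofList [c])).getD 0

-- the splicing for-loop ('j += 1' then 'int(b[j])' ⇒ index j starting at 0, then increment)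
def pvSpliceGo (ds : List Int) (b : List Char) (j : Nat) : List Int :=
  match ds with
  | [] => []
  | v :: t =>
      if v = 0 then pvCharInt ((PySem.List.pyGet? b (j : Int)).getD '0') :: pvSpliceGo t b (j + 1)
      else v :: pvSpliceGo t b j

-- the summing for-loop: res += pow(2, i) * v
def pvSumGo (acc : Int) (i : Nat) (ds : List Int) : Int :=
  match ds with
  | [] => acc
  | v :: t => pvSumGo (acc + 2 ^ i * v) (i + 1) t

def solve (N : Int) (K : Int) : Int :=
  let p := pvDigitsA N
  if ((2 : Int) ^ p.2) < K then -1  -- (1 << zeros) < K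
  else
    let b := (pvZfill p.2 (pvBinStr (K - 1))).reverse
    pvSumGo 0 0 (pvSpliceGo p.1 b 0)

-- ===== PORT B =====
-- the single while-loop of Source B: returns (res, zeros)
def pvLoopB (m res fill : Int) (zeros i : Nat) : Int × Nat :=
  if h : 0 < m then
    if PySem.Int.mod m 2 = 1 then
      pvLoopB (PySem.Int.floordiv m 2) (res + 2 ^ i) fill zeros (i + 1)
    else
      pvLoopB (PySem.Int.floordiv m 2) (res + PySem.Int.mod fill 2 * 2 ^ i)
        (PySem.Int.floordiv fill 2) (zeros + 1) (i + 1)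
  else (res, zeros)
termination_by m.toNat
decreasing_by all_goals exact pv_fd2_lt m h

def solve_alt (N : Int) (K : Int) : Int :=
  if K < 1 then 0  -- Source B raises ValueError here; outside Pre_solve, value unclaimed
  else
    let p := pvLoopB N 0 (K - 1) 0 0
    if ((2 : Int) ^ p.2) < K then -1  -- (1 << zeros) < K
    else p.1

-- ===== PRECONDITION & SPEC =====
-- Pre_ excludes K ≤ 0 (outside the problem's domain, K ≥ 1 there): A parses the string
-- bin(K-1) of a negative number, raising ValueError on its 'b' character whenever N has
-- enough zero bits to reach it and otherwise returning an accidental value assembled from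
-- the digits of -(K-1); B raises ValueError for every such K.
def Pre_solve (N : Int) (K : Int) : Prop := 1 ≤ K
instance (N : Int) (K : Int) : Decidable (Pre_solve N K) := by unfold Pre_solve; infer_instance
def pvWitness_solve : Int × Int := (12, 4)

def Spec_solve (N : Int) (K : Int) (out : Int) : Prop := out = solve_alt N K
instance (N : Int) (K : Int) (out : Int) : Decidable (Spec_solve N K out) := by unfold Spec_solve; infer_instance

-- ===== CLAIM (what is proved, stated in full; the proofs are below) =====
def Claim_equal_solve : Prop := ∀ (N : Int) (K : Int), Dom_solve N K → Pre_solve N K → Spec_solve N K (solve N K)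

-- ===== LEMMAS AND PROOFS =====

def pvVal (ds : List Int) : Int :=
  match ds with
  | [] => 0
  | v :: t => v + 2 * pvVal t

def pvMerged (m fill : Int) : Int :=
  if h : 0 < m then
    if m % 2 = 1 then 1 + 2 * pvMerged (m / 2) fill
    else fill % 2 + 2 * pvMerged (m / 2) (fill / 2)
  else 0
termination_by m.toNat
decreasing_by all_goals omega

theorem pv_two_pos : (0:Int) < 2 := by norm_num

theorem pvMod2 (m : Int) : PySem.Int.mod m 2 = m % 2 := PySem.Int.mod_eq_emod_of_pos pv_two_pos
theorem pvDiv2 (m : Int) : PySem.Int.floordiv m 2 = m / 2 := PySem.Int.floordiv_eq_ediv_of_pos pv_two_pos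

theorem pvLoopB_pos_odd (m res fill : Int) (z i : ℕ) (h : 0 < m) (hm : m % 2 = 1) :
    pvLoopB m res fill z i = pvLoopB (m / 2) (res + 2 ^ i) fill z (i + 1) := by
  rw [pvLoopB.eq_def]
  simp only [dif_pos h, pvMod2, pvDiv2, hm, reduceIte]

theorem pvLoopB_pos_even (m res fill : Int) (z i : ℕ) (h : 0 < m) (hm : m % 2 = 0) :
    pvLoopB m res fill z i = pvLoopB (m / 2) (res + fill % 2 * 2 ^ i) (fill / 2) (z + 1) (i + 1) := by
  rw [pvLoopB.eq_def]
  simp only [dif_pos h, pvMod2, pvDiv2, hm]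
  norm_num

theorem pvLoopB_nonpos (m res fill : Int) (z i : ℕ) (h : ¬ 0 < m) :
    pvLoopB m res fill z i = (res, z) := by
  rw [pvLoopB.eq_def]; simp only [dif_neg h]

theorem pvDigitsA_pos (m : Int) (h : 0 < m) :
    pvDigitsA m = ((m % 2) :: (pvDigitsA (m / 2)).1,
      (if m % 2 = 0 then 1 else 0) + (pvDigitsA (m / 2)).2) := by
  rw [pvDigitsA.eq_def]
  simp only [dif_pos h, pvMod2, pvDiv2]

theorem pvDigitsA_nonpos (m : Int) (h : ¬ 0 < m) : pvDigitsA m = ([], 0) := by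
  rw [pvDigitsA.eq_def]; simp only [dif_neg h]

theorem pvMerged_pos_odd (m fill : Int) (h : 0 < m) (hm : m % 2 = 1) :
    pvMerged m fill = 1 + 2 * pvMerged (m / 2) fill := by
  rw [pvMerged.eq_def]; simp only [dif_pos h, hm, reduceIte]

theorem pvMerged_pos_even (m fill : Int) (h : 0 < m) (hm : m % 2 = 0) :
    pvMerged m fill = fill % 2 + 2 * pvMerged (m / 2) (fill / 2) := by
  rw [pvMerged.eq_def]; simp only [dif_pos h, hm]; norm_num

theorem pvMerged_nonpos (m fill : Int) (h : ¬ 0 < m) : pvMerged m fill = 0 := by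
  rw [pvMerged.eq_def]; simp only [dif_neg h]

theorem pvLoopB_eq (m fill : Int) : ∀ (res : Int) (z i : ℕ),
    pvLoopB m res fill z i = (res + 2 ^ i * pvMerged m fill, z + (pvDigitsA m).2) := by
  fun_induction pvMerged m fill with
  | case1 m fill h hm ih =>
      intro res z i
      rw [pvLoopB_pos_odd m res fill z i h hm]
      rw [pvDigitsA_pos m h]
      rw [ih]
      simp only [hm, pow_succ]
      norm_num
      ring
  | case2 m fill h hm ih =>
      intro res z i
      have hm0 : m % 2 = 0 := by omega
      rw [pvLoopB_pos_even m res fill z i h hm0]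
      rw [pvDigitsA_pos m h]
      rw [ih]
      simp only [hm0, pow_succ]
      norm_num
      constructor
      · ring
      · omega
  | case3 m fill h =>
      intro res z i
      rw [pvLoopB_nonpos m res fill z i h]
      rw [pvDigitsA_nonpos m h]
      norm_num

theorem pvSumGo_eq (ds : List Int) : ∀ (acc : Int) (i : ℕ),
    pvSumGo acc i ds = acc + 2 ^ i * pvVal ds := by
  induction ds with
  | nil => intro acc i; simp [pvSumGo, pvVal]
  | cons v t ih =>
      intro acc i
      rw [pvSumGo, ih, pvVal, pow_succ]
      ring

theorem pvCharInt_zero : pvCharInt '0' = 0 := by decide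
theorem pvCharInt_one : pvCharInt '1' = 1 := by decide

theorem pvBinGo_pos (n : Int) (h : 0 < n) :
    pvBinGo n = pvBinGo (n / 2) ++ [if n % 2 = 1 then '1' else '0'] := by
  rw [pvBinGo.eq_def]
  simp only [dif_pos h, pvMod2, pvDiv2]

theorem pvBinGo_nonpos (n : Int) (h : ¬ 0 < n) : pvBinGo n = [] := by
  rw [pvBinGo.eq_def]; simp only [dif_neg h]

theorem pvBinGo_parse (k : ℕ) : ∀ (n : Int), n.toNat = k → 0 ≤ n → ∀ (j : ℕ),
    pvCharInt (((pvBinGo n).reverse)[j]?.getD '0') = ((n.toNat / 2 ^ j % 2 : ℕ) : Int) := by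
  induction k using Nat.strong_induction_on with
  | _ k ih =>
    intro n hk hn j
    by_cases h : 0 < n
    · rw [pvBinGo_pos n h, List.reverse_append]
      cases j with
      | zero =>
          simp only [List.reverse_cons, List.reverse_nil, List.nil_append, List.cons_append,
            List.getElem?_cons_zero, Option.getD_some, pow_zero, Nat.div_one]
          rcases Int.emod_two_eq_zero_or_one n with h0 | h1
          · rw [if_neg (by omega), pvCharInt_zero]; omega
          · rw [if_pos h1, pvCharInt_one]; omega
      | succ j =>
          simp only [List.reverse_cons, List.reverse_nil, List.nil_append, List.cons_append,
            List.getElem?_cons_succ]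
          have hrec := ih (n / 2).toNat (by omega) (n / 2) rfl (by omega) j
          rw [hrec]
          have h2 : (n / 2).toNat = n.toNat / 2 := by omega
          rw [h2, Nat.div_div_eq_div_mul, ← pow_succ']
    · rw [pvBinGo_nonpos n h]
      simp only [List.reverse_nil, List.getElem?_nil, Option.getD_none, pvCharInt_zero]
      have : n.toNat = 0 := by omega
      rw [this]; simp

theorem pvBinGo_lt (k : ℕ) : ∀ (n : Int), n.toNat = k → 0 ≤ n →
    n.toNat < 2 ^ (pvBinGo n).length := by
  induction k using Nat.strong_induction_on with
  | _ k ih =>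
    intro n hk hn
    by_cases h : 0 < n
    · rw [pvBinGo_pos n h]
      simp only [List.length_append, List.length_singleton]
      have hrec := ih (n / 2).toNat (by omega) (n / 2) rfl (by omega)
      have h2 : 2 ^ ((pvBinGo (n / 2)).length + 1) = 2 * 2 ^ (pvBinGo (n / 2)).length := by ring
      rw [h2]
      omega
    · rw [pvBinGo_nonpos n h]
      simp only [List.length_nil, pow_zero]
      omega

theorem pvB_parse (F : Int) (z : ℕ) (hF : 0 ≤ F) (hlt : F.toNat < 2 ^ z) (j : ℕ) :
    pvCharInt ((PySem.List.pyGet? ((pvZfill z (pvBinStr F)).reverse) (j : Int)).getD '0')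
      = ((F.toNat / 2 ^ j % 2 : ℕ) : Int) := by
  rw [PySem.List.pyGet?_natCast]
  unfold pvZfill pvBinStr
  by_cases hF0 : F = 0
  · subst hF0
    rw [if_pos rfl]
    have hall : (List.replicate (z - ([ '0' ] : List Char).length) '0' ++ ['0']).reverse
        = List.replicate (z - ([ '0' ] : List Char).length + 1) '0' := by
      rw [List.reverse_append, List.reverse_replicate]
      simp [List.replicate_succ]
    rw [hall, List.getElem?_replicate]
    split_ifs <;> simp [pvCharInt_zero]
  · rw [if_neg hF0, List.reverse_append, List.reverse_replicate]
    set L := (pvBinGo F).reverse with hL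
    have hlen : L.length = (pvBinGo F).length := by rw [hL, List.length_reverse]
    by_cases hj : j < L.length
    · rw [List.getElem?_append_left hj]
      exact pvBinGo_parse F.toNat F rfl hF j
    · rw [List.getElem?_append_right (by omega)]
      have hbig : F.toNat < 2 ^ j := by
        have h1 := pvBinGo_lt F.toNat F rfl hF
        have h2 : 2 ^ (pvBinGo F).length ≤ 2 ^ j := Nat.pow_le_pow_right (by norm_num) (by omega)
        omega
      rw [Nat.div_eq_of_lt hbig]
      rcases lt_or_ge (j - L.length) (z - (pvBinGo F).length) with hc | hc
      · rw [List.getElem?_replicate, if_pos hc]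
        simp [pvCharInt_zero]
      · rw [List.getElem?_replicate, if_neg (by omega)]
        simp [pvCharInt_zero]

theorem pvSplice_val (F : Int) (z : ℕ) (hF : 0 ≤ F) (hlt : F.toNat < 2 ^ z) (k : ℕ) :
    ∀ (m : Int), m.toNat = k → ∀ (j : ℕ),
      pvVal (pvSpliceGo (pvDigitsA m).1 ((pvZfill z (pvBinStr F)).reverse) j)
        = pvMerged m ((F.toNat / 2 ^ j : ℕ) : Int) := by
  induction k using Nat.strong_induction_on with
  | _ k ih =>
    intro m hk j
    by_cases h : 0 < m
    · rw [pvDigitsA_pos m h]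
      rcases Int.emod_two_eq_zero_or_one m with h0 | h1
      · rw [h0, pvSpliceGo, if_pos rfl, pvVal,
          pvB_parse F z hF hlt j,
          ih (m / 2).toNat (by omega) (m / 2) rfl (j + 1),
          pvMerged_pos_even m _ h h0]
        have e1 : ((F.toNat / 2 ^ j : ℕ) : Int) % 2 = ((F.toNat / 2 ^ j % 2 : ℕ) : Int) := by omega
        have e2 : ((F.toNat / 2 ^ j : ℕ) : Int) / 2 = ((F.toNat / 2 ^ (j + 1) : ℕ) : Int) := by
          have : F.toNat / 2 ^ (j + 1) = F.toNat / 2 ^ j / 2 := by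
            rw [pow_succ, ← Nat.div_div_eq_div_mul]
          rw [this]; omega
        rw [e1, e2]
      · rw [h1, pvSpliceGo, if_neg (by norm_num), pvVal,
          ih (m / 2).toNat (by omega) (m / 2) rfl j,
          pvMerged_pos_odd m _ h h1]
    · rw [pvDigitsA_nonpos m h]
      rw [pvSpliceGo, pvVal, pvMerged_nonpos m _ h]

theorem pv_solve_eq (N K : Int) (hK : 1 ≤ K) : solve N K = solve_alt N K := by
  simp only [solve, solve_alt, pvLoopB_eq, zero_add, pow_zero, one_mul,
    if_neg (show ¬ K < 1 by omega)]
  split_ifs with hg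
  · rfl
  · set z := (pvDigitsA N).2 with hz
    have hF : 0 ≤ K - 1 := by omega
    have hcast : ((2 ^ z : ℕ) : Int) = 2 ^ z := by push_cast; rfl
    have hlt : (K - 1).toNat < 2 ^ z := by omega
    rw [pvSumGo_eq, pvSplice_val (K - 1) z hF hlt N.toNat N rfl 0]
    simp only [pow_zero, Nat.div_one]
    rw [Int.toNat_of_nonneg hF]
    ring

-- ===== VERDICT (by name: the statement is the Claim_ definition above) =====
theorem solve_spec : Claim_equal_solve := by
  intro N K _ hK
  unfold Spec_solve
  exact pv_solve_eq N K hK
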